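-- pv_equiv track=rewrite | github.com/sergiuharjau/Uni_ProjectArchive | FreeTime/Canvassing/degreeCalculator.py | findMinimumOfCredits
-- ===== SOURCE A (Python) =====
-- def findMinimumOfCredits(givenList, credits):
--
--     minimum = [100,100]
--     for element in givenList:
--         if element[0] < minimum[0] and element[1]==credits:
--             minimum = element
--
--     if minimum[0] == 100:
--         return [0,0]
--     return minimum
-- ===== SOURCE B (Python) =====
-- def findMinimumOfCredits(givenList, credits):
--     for e in sorted(givenList, key=lambda r: r[0]):
--         if e[0] < 100 and e[1] == credits:
--             return e
--     return [0, 0]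
-- ===== Notes on version B (the rewrite author's own statement) =====
-- stated objective: alternative
-- what changed: Replaces A's single running-minimum loop with sentinel [100,100] by stable-sorting the rows on their first element and returning the first row in sorted order with first element < 100 and second element == credits (else [0,0]); stability makes the first match exactly A's first-minimal candidate.
import Mathlib
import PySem

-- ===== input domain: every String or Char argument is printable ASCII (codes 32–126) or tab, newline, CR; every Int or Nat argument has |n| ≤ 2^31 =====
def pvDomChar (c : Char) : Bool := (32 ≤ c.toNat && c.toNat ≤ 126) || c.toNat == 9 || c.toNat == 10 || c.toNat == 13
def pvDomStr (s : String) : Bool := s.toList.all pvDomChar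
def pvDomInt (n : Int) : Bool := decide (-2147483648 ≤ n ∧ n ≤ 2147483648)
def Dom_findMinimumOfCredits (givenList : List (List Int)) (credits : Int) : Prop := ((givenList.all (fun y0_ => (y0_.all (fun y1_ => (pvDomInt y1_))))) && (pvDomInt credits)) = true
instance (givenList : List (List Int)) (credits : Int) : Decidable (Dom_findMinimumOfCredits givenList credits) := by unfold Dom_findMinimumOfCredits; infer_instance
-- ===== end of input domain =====

-- B replaces A's running-minimum loop (sentinel [100,100]) by a stable sort on the row's
-- first element followed by a scan returning the first matching candidate (alternative
-- decomposition; same return value, B pays an O(n log n) sort).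


-- ===== PORT A =====
-- element[0]/element[1] ported with pyGetD (default 0); Pre_ excludes exactly the inputs
-- on which the Python reads an out-of-range index (IndexError), so the default is never
-- the value used inside Pre_.
def findMinimumOfCredits (givenList : List (List Int)) (credits : Int) : List Int :=
  let minimum : List Int := [100, 100]
  let minimum := givenList.foldl (fun minimum element =>
    if PySem.List.pyGetD element 0 0 < PySem.List.pyGetD minimum 0 0
        ∧ PySem.List.pyGetD element 1 0 = credits
    then element else minimum) minimum
  if PySem.List.pyGetD minimum 0 0 = 100 then [0, 0] else minimum

-- ===== PORT B =====
-- sorted(givenList, key=lambda r: r[0]) then the for-loop with early return is find?.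
def findMinimumOfCredits_alt (givenList : List (List Int)) (credits : Int) : List Int :=
  match (PySem.List.sorted givenList (fun r => PySem.List.pyGetD r 0 0)).find?
      (fun e => decide (PySem.List.pyGetD e 0 0 < 100)
                && decide (PySem.List.pyGetD e 1 0 = credits)) with
  | some e => e
  | none => [0, 0]

-- ===== PRECONDITION & SPEC =====
-- Pre_ holds exactly where the Python A returns (everywhere else it raises IndexError):
-- every row must be nonempty (A always reads element[0]), and a length-1 row may not have
-- first element below the running minimum at its position — i.e. it must be ≥ 100 or some
-- earlier row of length ≥ 2 must match credits with a first element ≤ it (else A reads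
-- its missing element[1]).
def Pre_findMinimumOfCredits (givenList : List (List Int)) (credits : Int) : Prop :=
  ∀ i < givenList.length,
    givenList.getD i [] ≠ [] ∧
    ((givenList.getD i []).length = 1 →
      100 ≤ (givenList.getD i []).getD 0 0 ∨
      ∃ j < i, 2 ≤ (givenList.getD j []).length ∧
        (givenList.getD j []).getD 1 0 = credits ∧
        (givenList.getD j []).getD 0 0 ≤ (givenList.getD i []).getD 0 0)
instance (givenList : List (List Int)) (credits : Int) : Decidable (Pre_findMinimumOfCredits givenList credits) := by unfold Pre_findMinimumOfCredits; infer_instance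

def pvWitness_findMinimumOfCredits : List (List Int) × Int := ([[50, 3], [30, 2], [150], [40, 3], [45]], 3)

def Spec_findMinimumOfCredits (givenList : List (List Int)) (credits : Int) (out : List Int) : Prop := out = findMinimumOfCredits_alt givenList credits
instance (givenList : List (List Int)) (credits : Int) (out : List Int) : Decidable (Spec_findMinimumOfCredits givenList credits out) := by unfold Spec_findMinimumOfCredits; infer_instance

-- ===== CLAIM (what is proved, stated in full; the proofs are below) =====
def Claim_equal_findMinimumOfCredits : Prop := ∀ (givenList : List (List Int)) (credits : Int), Dom_findMinimumOfCredits givenList credits → Pre_findMinimumOfCredits givenList credits → Spec_findMinimumOfCredits givenList credits (findMinimumOfCredits givenList credits)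

-- ===== LEMMAS AND PROOFS =====

-- The common normal form both ports are reduced to: a running first-minimum fold.
def minFoldG {α : Type} (key : α → Int) (ys : List α) (acc : Option α) : Option α :=
  ys.foldl (fun acc x =>
    match acc with
    | none => some x
    | some m => if key x < key m then some x else some m) acc

theorem minFoldG_cons_none {α : Type} (key : α → Int) (x : α) (ys : List α) :
    minFoldG key (x :: ys) none = minFoldG key ys (some x) := rfl

theorem minFoldG_cons_some {α : Type} (key : α → Int) (x m : α) (ys : List α) :
    minFoldG key (x :: ys) (some m)
      = minFoldG key ys (if key x < key m then some x else some m) := rfl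

theorem minFoldG_some {α : Type} (key : α → Int) (ys : List α) :
    ∀ x : α, ∃ z, minFoldG key ys (some x) = some z := by
  induction ys with
  | nil => intro x; exact ⟨x, rfl⟩
  | cons y t ih =>
    intro x
    by_cases h : key y < key x
    · rw [minFoldG_cons_some, if_pos h]; exact ih y
    · rw [minFoldG_cons_some, if_neg h]; exact ih x

theorem min?_eq_minFoldG {α : Type} (key : α → Int) (ys : List α) :
    PySem.List.min? ys key = minFoldG key ys none := by
  unfold PySem.List.min? minFoldG
  rfl

-- A SIDE. Loop invariant: A's running-minimum fold from m equals the minFoldG over the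
-- filtered list, where (acc = none ∧ m[0] = 100) — the sentinel state — or
-- (acc = some m ∧ m[0] < 100) — a real adopted candidate.
theorem loop_inv (credits : Int) (l : List (List Int)) :
    ∀ (m : List Int) (acc : Option (List Int)),
    ((acc = none ∧ PySem.List.pyGetD m 0 0 = 100) ∨
     (acc = some m ∧ PySem.List.pyGetD m 0 0 < 100)) →
    l.foldl (fun minimum element =>
      if PySem.List.pyGetD element 0 0 < PySem.List.pyGetD minimum 0 0
          ∧ PySem.List.pyGetD element 1 0 = credits
      then element else minimum) m
    = (match minFoldG (fun e => PySem.List.pyGetD e 0 0) (l.filter (fun e =>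
        decide (PySem.List.pyGetD e 0 0 < 100) && decide (PySem.List.pyGetD e 1 0 = credits))) acc with
       | none => m
       | some x => x) := by
  induction l with
  | nil =>
    intro m acc h
    rcases h with ⟨rfl, _⟩ | ⟨rfl, _⟩ <;> simp [minFoldG]
  | cons e t ih =>
    intro m acc h
    by_cases hq : PySem.List.pyGetD e 0 0 < 100 ∧ PySem.List.pyGetD e 1 0 = credits
    · have hfiltT : (decide (PySem.List.pyGetD e 0 0 < 100)
          && decide (PySem.List.pyGetD e 1 0 = credits)) = true := by
        simp [hq.1, hq.2]
      obtain ⟨z, hz⟩ := minFoldG_some (fun e => PySem.List.pyGetD e 0 0) (t.filter (fun e =>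
        decide (PySem.List.pyGetD e 0 0 < 100) && decide (PySem.List.pyGetD e 1 0 = credits))) e
      rcases h with ⟨rfl, hm⟩ | ⟨rfl, hm⟩
      · have hcond : PySem.List.pyGetD e 0 0 < PySem.List.pyGetD m 0 0
            ∧ PySem.List.pyGetD e 1 0 = credits := ⟨by omega, hq.2⟩
        simp only [List.foldl_cons, List.filter_cons, hfiltT, if_true, if_pos hcond,
          minFoldG_cons_none]
        rw [ih e (some e) (Or.inr ⟨rfl, hq.1⟩), hz]
      · by_cases hlt : PySem.List.pyGetD e 0 0 < PySem.List.pyGetD m 0 0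
        · have hcond : PySem.List.pyGetD e 0 0 < PySem.List.pyGetD m 0 0
              ∧ PySem.List.pyGetD e 1 0 = credits := ⟨hlt, hq.2⟩
          simp only [List.foldl_cons, List.filter_cons, hfiltT, if_true, if_pos hcond,
            minFoldG_cons_some, if_pos hlt]
          rw [ih e (some e) (Or.inr ⟨rfl, hq.1⟩), hz]
        · obtain ⟨z', hz'⟩ := minFoldG_some (fun e => PySem.List.pyGetD e 0 0) (t.filter (fun e =>
            decide (PySem.List.pyGetD e 0 0 < 100) && decide (PySem.List.pyGetD e 1 0 = credits))) m
          have hcond : ¬ (PySem.List.pyGetD e 0 0 < PySem.List.pyGetD m 0 0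
              ∧ PySem.List.pyGetD e 1 0 = credits) := fun h => hlt h.1
          simp only [List.foldl_cons, List.filter_cons, hfiltT, if_true, if_neg hcond,
            minFoldG_cons_some, if_neg hlt]
          rw [ih m (some m) (Or.inr ⟨rfl, hm⟩), hz']
    · have hfilt : ¬ ((decide (PySem.List.pyGetD e 0 0 < 100)
          && decide (PySem.List.pyGetD e 1 0 = credits)) = true) := by
        simp only [Bool.and_eq_true, decide_eq_true_eq]; exact hq
      have hm100 : PySem.List.pyGetD m 0 0 ≤ 100 := by
        rcases h with ⟨_, hm⟩ | ⟨_, hm⟩ <;> omega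
      have hcond : ¬ (PySem.List.pyGetD e 0 0 < PySem.List.pyGetD m 0 0
          ∧ PySem.List.pyGetD e 1 0 = credits) := by
        intro ⟨h1, h2⟩; exact hq ⟨by omega, h2⟩
      simp only [List.foldl_cons, List.filter_cons, if_neg hcond, if_neg hfilt]
      exact ih m acc h

-- B SIDE. Inserting x into a key-sorted list: the first q-element of the result is x
-- exactly when q x holds and x's key strictly beats the previous first q-element.
theorem find?_insertBy {α : Type} (key : α → Int) (q : α → Bool) (x : α) (s : List α)
    (hs : s.Pairwise (fun a b => key a ≤ key b)) :
    (PySem.List.insertBy (fun a b => decide (key a < key b)) x s).find? q =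
      if q x then
        (match s.find? q with
         | none => some x
         | some m => if key x < key m then some x else some m)
      else s.find? q := by
  induction s with
  | nil =>
    simp only [PySem.List.insertBy, List.find?]
    by_cases hq : q x <;> simp [hq]
  | cons y ys ih =>
    have hy : ∀ z ∈ ys, key y ≤ key z := fun z hz => (List.pairwise_cons.mp hs).1 z hz
    by_cases hxy : key x < key y
    · have hins : PySem.List.insertBy (fun a b => decide (key a < key b)) x (y :: ys)
          = x :: y :: ys := by simp [PySem.List.insertBy, hxy]
      rw [hins]
      by_cases hq : q x
      · rw [List.find?_cons_of_pos hq, if_pos hq]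
        cases hfind : (y :: ys).find? q with
        | none => rfl
        | some m =>
          have hm : m ∈ y :: ys := List.mem_of_find?_eq_some hfind
          have hym : key y ≤ key m := by
            rcases List.mem_cons.mp hm with rfl | h
            · exact le_refl _
            · exact hy m h
          have hxm : key x < key m := by omega
          show some x = if key x < key m then some x else some m
          rw [if_pos hxm]
      · rw [List.find?_cons_of_neg hq, if_neg hq]
    · have hins : PySem.List.insertBy (fun a b => decide (key a < key b)) x (y :: ys)
          = y :: PySem.List.insertBy (fun a b => decide (key a < key b)) x ys := by
        simp [PySem.List.insertBy, hxy]
      rw [hins]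
      by_cases hqy : q y
      · rw [List.find?_cons_of_pos hqy, List.find?_cons_of_pos hqy]
        by_cases hq : q x
        · rw [if_pos hq]
          simp only []
          rw [if_neg (by omega : ¬ key x < key y)]
        · rw [if_neg hq]
      · rw [List.find?_cons_of_neg hqy,
          List.find?_cons_of_neg hqy]
        exact ih (List.pairwise_cons.mp hs).2

theorem sorted_append_singleton {α : Type} (key : α → Int) (l : List α) (x : α) :
    PySem.List.sorted (l ++ [x]) key
      = PySem.List.insertBy (fun a b => decide (key a < key b)) x (PySem.List.sorted l key) := by
  rw [PySem.List.sorted_eq_foldl_insertBy, PySem.List.sorted_eq_foldl_insertBy,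
    List.foldl_append]
  rfl

-- B's sort-then-first-match equals the same running first-minimum over the filtered list.
theorem find?_sorted_eq_minFoldG {α : Type} (key : α → Int) (q : α → Bool) (l : List α) :
    (PySem.List.sorted l key).find? q = minFoldG key (l.filter q) none := by
  induction l using List.reverseRecOn with
  | nil => simp [PySem.List.sorted, minFoldG]
  | append_singleton l x ih =>
    rw [sorted_append_singleton,
      find?_insertBy key q x _ (PySem.List.sorted_pairwise l key), ih,
      List.filter_append]
    by_cases hq : q x
    · simp only [hq, if_true, List.filter_cons, List.filter_nil]
      unfold minFoldG
      rw [List.foldl_append]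
      cases h : minFoldG key (l.filter q) none with
      | none => unfold minFoldG at h; rw [h]; rfl
      | some m => unfold minFoldG at h; rw [h]; rfl
    · simp [hq]

-- ===== VERDICT (by name: the statement is the Claim_ definition above) =====
theorem findMinimumOfCredits_spec : Claim_equal_findMinimumOfCredits := by
  intro givenList credits _ _
  unfold Spec_findMinimumOfCredits findMinimumOfCredits findMinimumOfCredits_alt
  dsimp only
  rw [find?_sorted_eq_minFoldG]
  have h := loop_inv credits givenList [100, 100] none (Or.inl ⟨rfl, by decide⟩)
  rw [h]
  cases hfold : minFoldG (fun e => PySem.List.pyGetD e 0 0) (givenList.filter (fun e =>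
      decide (PySem.List.pyGetD e 0 0 < 100) && decide (PySem.List.pyGetD e 1 0 = credits))) none with
  | none => simp
  | some x =>
    have hmem : x ∈ givenList.filter (fun e =>
        decide (PySem.List.pyGetD e 0 0 < 100) && decide (PySem.List.pyGetD e 1 0 = credits)) :=
      PySem.List.min?_mem (by rw [min?_eq_minFoldG, hfold])
    have hx : PySem.List.pyGetD x 0 0 < 100 := by
      have := (List.mem_filter.mp hmem).2
      simp only [Bool.and_eq_true, decide_eq_true_eq] at this
      exact this.1
    simp only [if_neg (by omega : ¬ PySem.List.pyGetD x 0 0 = 100)]
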